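-- pv_equiv track=rewrite | github.com/0xStryK3R/Scaler-DSA-Revision | python/Day-50/HW_3.py | solve
-- ===== SOURCE A (Python) =====
-- def solve(A):
--     md_stack = [A[0]]
--     ans = 0
--
--     for num in A[1:]:
--         while md_stack and md_stack[-1] < num:
--             ans = max(ans, num ^ md_stack.pop())
--         if md_stack:
--             ans = max(ans, num ^ md_stack[-1])
--         md_stack.append(num)
--
--     return ans
-- ===== SOURCE B (Python) =====
-- def solve(A):
--     # Declarative re-implementation: a pair (i, j), i < j, is considered by the
--     # monotonic-stack algorithm iff every element strictly between is <= A[i]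
--     # and < A[j]; take the max XOR over all such pairs (0 if none).
--     n = len(A)
--     ans = 0
--     for j in range(n):
--         for i in range(j):
--             if all(A[k] <= A[i] and A[k] < A[j] for k in range(i + 1, j)):
--                 ans = max(ans, A[i] ^ A[j])
--     return ans
-- ===== Notes on version B (the rewrite author's own statement) =====
-- stated objective: alternative
-- what changed: Replaces the stateful monotonic-stack pass by a declarative double loop over index pairs: a pair (i,j) contributes iff every element strictly between is <= A[i] and < A[j], which characterises exactly the stack-adjacent pairs; no stack is maintained.
import Mathlib
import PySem

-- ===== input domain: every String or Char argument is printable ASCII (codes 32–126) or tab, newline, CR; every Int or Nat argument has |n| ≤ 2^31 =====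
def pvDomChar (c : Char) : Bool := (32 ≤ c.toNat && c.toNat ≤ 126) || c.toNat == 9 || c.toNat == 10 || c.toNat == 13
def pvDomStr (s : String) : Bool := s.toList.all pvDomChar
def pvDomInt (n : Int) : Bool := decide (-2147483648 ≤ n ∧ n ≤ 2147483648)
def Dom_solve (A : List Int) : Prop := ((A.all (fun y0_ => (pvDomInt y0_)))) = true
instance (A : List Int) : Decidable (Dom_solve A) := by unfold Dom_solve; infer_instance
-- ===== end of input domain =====

-- B replaces A's stateful monotonic-stack pass by a declarative double loop over index
-- pairs (the pairs the stack ever compares are exactly those with every in-between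
-- element <= A[i] and < A[j]); same return value, no stack maintained.

-- ===== PORT A =====
-- the inner `while md_stack and md_stack[-1] < num` loop (stack kept top-first)
def popLoop (num : Int) : List Int → Int → List Int × Int
  | [], ans => ([], ans)
  | t :: rest, ans =>
    if t < num then popLoop num rest (max ans (PySem.Int.bxor num t))
    else (t :: rest, ans)

-- one iteration of `for num in A[1:]`
def stepA (st : List Int × Int) (num : Int) : List Int × Int :=
  match popLoop num st.1 st.2 with
  | ([], a) => (num :: [], a)
  | (t :: rest, a) => (num :: t :: rest, max a (PySem.Int.bxor num t))

def solve (A : List Int) : Int :=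
  match A with
  | [] => 0      -- Python raises IndexError here (first-element access); excluded by Pre_solve
  | a0 :: rest => (rest.foldl stepA ([a0], 0)).2

-- ===== PORT B =====
-- `all(A[k] <= A[i] and A[k] < A[j] for k in range(i + 1, j))` (indices always in range)
def pairOKb (A : List Int) (i j : Nat) : Bool :=
  (List.range' (i + 1) (j - (i + 1))).all
    (fun k => decide (A.getD k 0 ≤ A.getD i 0) && decide (A.getD k 0 < A.getD j 0))

-- the inner `for i in range(j)` loop
def innerB (A : List Int) (ans : Int) (j : Nat) : Int :=
  (List.range j).foldl
    (fun a i => if pairOKb A i j then max a (PySem.Int.bxor (A.getD i 0) (A.getD j 0)) else a)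
    ans

def solve_alt (A : List Int) : Int :=
  (List.range A.length).foldl (innerB A) 0

-- ===== PRECONDITION & SPEC =====
-- A unconditionally indexes the first element, so it raises IndexError exactly on the empty list.
def Pre_solve (A : List Int) : Prop := A ≠ []
instance (A : List Int) : Decidable (Pre_solve A) := by unfold Pre_solve; infer_instance
def pvWitness_solve : List Int := ([2, 1, 3])

def Spec_solve (A : List Int) (out : Int) : Prop := out = solve_alt A
instance (A : List Int) (out : Int) : Decidable (Spec_solve A out) := by unfold Spec_solve; infer_instance

-- ===== CLAIM (what is proved, stated in full; the proofs are below) =====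
def Claim_equal_solve : Prop := ∀ (A : List Int), Dom_solve A → Pre_solve A → Spec_solve A (solve A)

-- ===== LEMMAS AND PROOFS =====

-- `i` is a suffix maximum of the first `m` elements (never yet popped from the stack)
def sMax (A : List Int) (m i : Nat) : Prop :=
  ∀ k, k < m → i < k → A.getD k 0 ≤ A.getD i 0

def sMaxb (A : List Int) (m i : Nat) : Bool :=
  decide (∀ k, k < m → i < k → A.getD k 0 ≤ A.getD i 0)

lemma sMaxb_iff {A : List Int} {m i : Nat} : sMaxb A m i = true ↔ sMax A m i := by
  unfold sMaxb sMax
  exact decide_eq_true_iff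

-- the indices on A's stack after processing the first `m` elements, top first
def stkIdx (A : List Int) (m : Nat) : List Nat :=
  ((List.range m).filter (fun i => sMaxb A m i)).reverse

-- the pair condition of B, as a Prop, for j = m
def pOK (A : List Int) (m i : Nat) : Prop :=
  ∀ k, k < m → i < k → A.getD k 0 ≤ A.getD i 0 ∧ A.getD k 0 < A.getD m 0

lemma mem_stkIdx {A : List Int} {m i : Nat} :
    i ∈ stkIdx A m ↔ i < m ∧ sMax A m i := by
  simp [stkIdx, List.mem_reverse, List.mem_filter, List.mem_range, sMaxb_iff]

lemma stkIdx_pairwise_gt (A : List Int) (m : Nat) :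
    (stkIdx A m).Pairwise (fun a b => b < a) := by
  unfold stkIdx
  rw [List.pairwise_reverse]
  exact List.Pairwise.sublist List.filter_sublist List.pairwise_lt_range

lemma stkIdx_succ (A : List Int) (m : Nat) :
    stkIdx A (m + 1)
      = m :: (stkIdx A m).filter (fun i => decide (A.getD m 0 ≤ A.getD i 0)) := by
  unfold stkIdx
  rw [List.range_succ, List.filter_append, List.reverse_append]
  have hm : sMaxb A (m + 1) m = true := by
    rw [sMaxb_iff]
    intro k hk hk'; omega
  have hfilter : (List.range m).filter (fun i => sMaxb A (m + 1) i)
      = ((List.range m).filter (fun i => sMaxb A m i)).filter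
          (fun i => decide (A.getD m 0 ≤ A.getD i 0)) := by
    rw [List.filter_filter]
    apply List.filter_congr
    intro i hi
    rw [List.mem_range] at hi
    simp only [sMaxb]
    rw [Bool.eq_iff_iff]
    simp only [Bool.and_eq_true, decide_eq_true_eq]
    constructor
    · intro h
      exact ⟨h m (by omega) hi, fun k hk hik => h k (by omega) hik⟩
    · rintro ⟨hle, hsm⟩ k hk hik
      rcases Nat.lt_succ_iff_lt_or_eq.mp hk with h' | h'
      · exact hsm k h' hik
      · subst h'; exact hle
  rw [hfilter, List.filter_reverse]
  simp [List.filter_cons, hm]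

-- ---- generic fold-of-max machinery ----

def fmax {α : Type} (f : α → Int) (a : Int) (l : List α) : Int :=
  l.foldl (fun a v => max a (f v)) a

lemma fmax_cons {α : Type} (f : α → Int) (a : Int) (v : α) (t : List α) :
    fmax f a (v :: t) = fmax f (max a (f v)) t := rfl

lemma fmax_init_le {α : Type} (f : α → Int) (l : List α) :
    ∀ a, a ≤ fmax f a l := by
  induction l with
  | nil => intro a; exact le_refl a
  | cons v t ih =>
    intro a
    rw [fmax_cons]
    exact le_trans (le_max_left a (f v)) (ih (max a (f v)))

lemma fmax_mem_le {α : Type} (f : α → Int) {l : List α} {v : α} (hv : v ∈ l) :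
    ∀ a, f v ≤ fmax f a l := by
  induction l with
  | nil => cases hv
  | cons w t ih =>
    intro a
    rw [fmax_cons]
    rcases List.mem_cons.mp hv with h | h
    · subst h; exact le_trans (le_max_right a (f v)) (fmax_init_le f t _)
    · exact ih h _

lemma fmax_cases {α : Type} (f : α → Int) (l : List α) :
    ∀ a, fmax f a l = a ∨ ∃ v ∈ l, fmax f a l = f v := by
  induction l with
  | nil => intro a; exact Or.inl rfl
  | cons w t ih =>
    intro a
    rw [fmax_cons]
    rcases ih (max a (f w)) with h | ⟨v, hv, h⟩
    · rcases max_choice a (f w) with h' | h'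
      · exact Or.inl (by rw [h, h'])
      · exact Or.inr ⟨w, List.mem_cons_self .., by rw [h, h']⟩
    · exact Or.inr ⟨v, List.mem_cons_of_mem _ hv, h⟩

lemma fmax_le {α : Type} (f : α → Int) {l : List α} {a c : Int}
    (ha : a ≤ c) (hl : ∀ v ∈ l, f v ≤ c) : fmax f a l ≤ c := by
  rcases fmax_cases f l a with h | ⟨v, hv, h⟩
  · rw [h]; exact ha
  · rw [h]; exact hl v hv

lemma fmax_ext {α β : Type} (f : α → Int) (g : β → Int) {l1 : List α} {l2 : List β}
    (h : ∀ x, (∃ v ∈ l1, f v = x) ↔ (∃ w ∈ l2, g w = x)) (a : Int) :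
    fmax f a l1 = fmax g a l2 := by
  apply le_antisymm
  · refine fmax_le f (fmax_init_le g l2 a) (fun v hv => ?_)
    obtain ⟨w, hw, hgw⟩ := (h (f v)).mp ⟨v, hv, rfl⟩
    exact hgw ▸ fmax_mem_le g hw a
  · refine fmax_le g (fmax_init_le f l1 a) (fun w hw => ?_)
    obtain ⟨v, hv, hfv⟩ := (h (g w)).mpr ⟨w, hw, rfl⟩
    exact hfv ▸ fmax_mem_le f hv a

lemma fmax_append_singleton {α : Type} (f : α → Int) (a : Int) (l : List α) (v : α) :
    fmax f a (l ++ [v]) = max (fmax f a l) (f v) := by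
  simp [fmax, List.foldl_append]

lemma foldl_if_filter {α : Type} (q : α → Bool) (h : Int → α → Int) (l : List α) :
    ∀ a, l.foldl (fun a i => if q i then h a i else a) a = (l.filter q).foldl h a := by
  induction l with
  | nil => intro a; rfl
  | cons v t ih =>
    intro a
    by_cases hq : q v = true
    · simp [List.filter_cons, hq, ih]
    · simp only [Bool.not_eq_true] at hq
      simp [List.filter_cons, hq, ih]

-- ---- sorted takeWhile / dropWhile ----

lemma takeWhile_eq_filter_of_pw {α : Type} {p : α → Bool} {l : List α}
    (h : l.Pairwise (fun a b => p b = true → p a = true)) :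
    l.takeWhile p = l.filter p := by
  induction l with
  | nil => rfl
  | cons v t ih =>
    rcases List.pairwise_cons.mp h with ⟨hv, ht⟩
    by_cases hp : p v = true
    · simp [List.takeWhile_cons, List.filter_cons, hp, ih ht]
    · simp only [Bool.not_eq_true] at hp
      simp only [List.takeWhile_cons, List.filter_cons, hp, Bool.false_eq_true, if_false]
      rw [eq_comm, List.filter_eq_nil_iff]
      intro b hb hpb
      exact absurd (hv b hb hpb) (by simp [hp])

lemma dropWhile_eq_filter_of_pw {α : Type} {p : α → Bool} {l : List α}
    (h : l.Pairwise (fun a b => p b = true → p a = true)) :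
    l.dropWhile p = l.filter (fun a => ! p a) := by
  induction l with
  | nil => rfl
  | cons v t ih =>
    rcases List.pairwise_cons.mp h with ⟨hv, ht⟩
    by_cases hp : p v = true
    · simp [List.dropWhile_cons, List.filter_cons, hp, ih ht]
    · -- p v = false: dropWhile keeps everything, and no later element satisfies p either
      simp only [Bool.not_eq_true] at hp
      simp only [List.dropWhile_cons, List.filter_cons, hp, Bool.false_eq_true, if_false,
        Bool.not_false, if_true]
      congr 1
      rw [eq_comm, List.filter_eq_self]
      intro b hb
      by_cases hpb : p b = true
      · exact absurd (hv b hb hpb) (by simp [hp])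
      · simp [hpb]

-- the stack predicate "value < incoming" is monotone along stkIdx
lemma stkIdx_pw_pred (A : List Int) (m : Nat) (x : Int) :
    (stkIdx A m).Pairwise (fun a b =>
      decide (A.getD b 0 < x) = true → decide (A.getD a 0 < x) = true) := by
  refine (stkIdx_pairwise_gt A m).imp_of_mem ?_
  intro a b ha hb hba
  rcases mem_stkIdx.mp hb with ⟨hbm, hsb⟩
  rcases mem_stkIdx.mp ha with ⟨ham, _⟩
  simp only [decide_eq_true_eq]
  intro hlt
  exact lt_of_le_of_lt (hsb a ham hba) hlt

-- ---- the combinatorial core: A's stack contributions at step m = B's pairs (·, m) ----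

lemma contrib_iff (A : List Int) (m : Nat) :
    ∀ i : Nat,
      (i ∈ (stkIdx A m).takeWhile (fun i => decide (A.getD i 0 < A.getD m 0))
            ++ ((stkIdx A m).dropWhile (fun i => decide (A.getD i 0 < A.getD m 0))).take 1)
        ↔ (i < m ∧ pOK A m i) := by
  intro i
  set x := A.getD m 0 with hx
  set p : Nat → Bool := fun i => decide (A.getD i 0 < x) with hp
  have hpw := stkIdx_pw_pred A m x
  have htake : (stkIdx A m).takeWhile p = (stkIdx A m).filter p :=
    takeWhile_eq_filter_of_pw hpw
  have hdrop : (stkIdx A m).dropWhile p = (stkIdx A m).filter (fun a => ! p a) :=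
    dropWhile_eq_filter_of_pw hpw
  constructor
  · intro hmem
    rcases List.mem_append.mp hmem with hmem | hmem
    · -- popped element: on the stack and value < x
      rw [htake, List.mem_filter] at hmem
      rcases hmem with ⟨hstk, hpi⟩
      rcases mem_stkIdx.mp hstk with ⟨him, hsm⟩
      simp only [hp, decide_eq_true_eq] at hpi
      exact ⟨him, fun k hk hik =>
        ⟨hsm k hk hik, lt_of_le_of_lt (hsm k hk hik) hpi⟩⟩
    · -- the retained top: first stack element with value ≥ x
      rw [hdrop] at hmem
      rcases hD : (stkIdx A m).filter (fun a => ! p a) with _ | ⟨h, tl⟩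
      · rw [hD] at hmem; cases hmem
      · rw [hD] at hmem
        simp only [List.take, List.mem_singleton] at hmem
        subst hmem
        have hhmem : i ∈ (stkIdx A m).filter (fun a => ! p a) := by
          rw [hD]; exact List.mem_cons_self ..
        -- i is maximal among stack indices with value ≥ x
        have hmax : ∀ j ∈ (stkIdx A m).filter (fun a => ! p a), j ≤ i := by
          intro j hj
          have hpwf : ((stkIdx A m).filter (fun a => ! p a)).Pairwise (fun a b => b < a) :=
            List.Pairwise.sublist List.filter_sublist (stkIdx_pairwise_gt A m)
          rw [hD] at hj hpwf
          rcases List.mem_cons.mp hj with rfl | hj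
          · exact le_refl _
          · exact le_of_lt ((List.pairwise_cons.mp hpwf).1 j hj)
        rcases List.mem_filter.mp hhmem with ⟨hstk, hnp⟩
        rcases mem_stkIdx.mp hstk with ⟨him, hsm⟩
        refine ⟨him, ?_⟩
        -- downward strong induction: everything strictly between i and m is < x
        have key : ∀ d k, m - k ≤ d → i < k → k < m → A.getD k 0 < x := by
          intro d
          induction d with
          | zero => intro k h1 h2 h3; omega
          | succ d ih =>
            intro k h1 h2 h3
            by_contra hge
            rw [not_lt] at hge
            have hsk : sMax A m k := by
              intro k' hk' hkk'
              have : A.getD k' 0 < x := ih k' (by omega) (by omega) hk'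
              exact le_trans (le_of_lt this) hge
            have hkmem : k ∈ (stkIdx A m).filter (fun a => ! p a) := by
              rw [List.mem_filter]
              refine ⟨mem_stkIdx.mpr ⟨h3, hsk⟩, ?_⟩
              simp only [hp, Bool.not_eq_true', decide_eq_false_iff_not, not_lt]
              exact hge
            exact absurd (hmax k hkmem) (by omega)
        intro k hk hik
        exact ⟨hsm k hk hik, key (m - k) k (le_refl _) hik hk⟩
  · rintro ⟨him, hpok⟩
    have hsm : sMax A m i := fun k hk hik => (hpok k hk hik).1
    have hstk : i ∈ stkIdx A m := mem_stkIdx.mpr ⟨him, hsm⟩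
    by_cases hpi : p i = true
    · exact List.mem_append.mpr (Or.inl (by rw [htake, List.mem_filter]; exact ⟨hstk, hpi⟩))
    · refine List.mem_append.mpr (Or.inr ?_)
      rw [hdrop]
      have himem : i ∈ (stkIdx A m).filter (fun a => ! p a) := by
        rw [List.mem_filter]
        exact ⟨hstk, by simp_all⟩
      rcases hD : (stkIdx A m).filter (fun a => ! p a) with _ | ⟨h, tl⟩
      · rw [hD] at himem; cases himem
      · rw [hD] at himem
        rcases List.mem_cons.mp himem with rfl | hitl
        · simp [List.take]
        · exfalso
          have hhmem : h ∈ (stkIdx A m).filter (fun a => ! p a) := by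
            rw [hD]; exact List.mem_cons_self ..
          rcases List.mem_filter.mp hhmem with ⟨hhstk, hhnp⟩
          rcases mem_stkIdx.mp hhstk with ⟨hhm, _⟩
          have hpwf : ((stkIdx A m).filter (fun a => ! p a)).Pairwise (fun a b => b < a) :=
            List.Pairwise.sublist List.filter_sublist (stkIdx_pairwise_gt A m)
          rw [hD] at hpwf
          have hih : i < h := (List.pairwise_cons.mp hpwf).1 i hitl
          have hlt := (hpok h hhm hih).2
          rw [hp] at hhnp
          simp only [Bool.not_eq_true', decide_eq_false_iff_not, not_lt] at hhnp
          exact absurd hlt (not_lt.mpr hhnp)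

-- bridge: the Bool pair test of port B vs the Prop pOK
lemma pairOKb_iff (A : List Int) (m i : Nat) :
    pairOKb A i m = true ↔ pOK A m i := by
  unfold pairOKb pOK
  rw [List.all_eq_true]
  constructor
  · intro h k hk hik
    have hkmem : k ∈ List.range' (i + 1) (m - (i + 1)) := by
      rw [List.mem_range'_1]; omega
    have := h k hkmem
    simp only [Bool.and_eq_true, decide_eq_true_eq] at this
    exact this
  · intro h k hk
    rw [List.mem_range'_1] at hk
    have := h k (by omega) (by omega)
    simp only [Bool.and_eq_true, decide_eq_true_eq]
    exact this

-- popLoop computes dropWhile and folds max-xor over takeWhile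
lemma popLoop_eq (num : Int) (s : List Int) (ans : Int) :
    popLoop num s ans
      = (s.dropWhile (fun t => decide (t < num)),
         fmax (fun v => PySem.Int.bxor num v) ans (s.takeWhile (fun t => decide (t < num)))) := by
  induction s generalizing ans with
  | nil => rfl
  | cons t rest ih =>
    by_cases h : t < num
    · simp [popLoop, h, List.dropWhile_cons, List.takeWhile_cons, fmax, ih]
    · simp [popLoop, h, List.dropWhile_cons, List.takeWhile_cons, fmax]

-- B's inner loop at j = m as an fmax over the filtered index list
lemma innerB_eq (A : List Int) (ans : Int) (m : Nat) :
    innerB A ans m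
      = fmax (fun i => PySem.Int.bxor (A.getD i 0) (A.getD m 0)) ans
          ((List.range m).filter (fun i => pairOKb A i m)) := by
  unfold innerB fmax
  rw [foldl_if_filter]

-- one step of A's fold, on the stack of values, equals one step of B's outer loop
lemma step_eq (A : List Int) (m : Nat) (ans : Int) :
    stepA ((stkIdx A m).map (fun i => A.getD i 0), ans) (A.getD m 0)
      = ((stkIdx A (m + 1)).map (fun i => A.getD i 0), innerB A ans m) := by
  set x := A.getD m 0 with hx
  set p : Nat → Bool := fun i => decide (A.getD i 0 < x) with hp
  have hmap_tw : ((stkIdx A m).map (fun i => A.getD i 0)).takeWhile (fun t => decide (t < x))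
      = ((stkIdx A m).takeWhile p).map (fun i => A.getD i 0) := by
    rw [List.takeWhile_map]; rfl
  have hmap_dw : ((stkIdx A m).map (fun i => A.getD i 0)).dropWhile (fun t => decide (t < x))
      = ((stkIdx A m).dropWhile p).map (fun i => A.getD i 0) := by
    rw [List.dropWhile_map]; rfl
  have hfold : ∀ (l : List Nat) (a : Int),
      fmax (fun v => PySem.Int.bxor x v) a (l.map (fun i => A.getD i 0))
        = fmax (fun i => PySem.Int.bxor x (A.getD i 0)) a l := by
    intro l a; unfold fmax; rw [List.foldl_map]
  -- the answer produced by the step, as an fmax over takeWhile ++ (dropWhile).take 1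
  have hans : ∀ D, (stkIdx A m).dropWhile p = D →
      (stepA ((stkIdx A m).map (fun i => A.getD i 0), ans) x).2 =
        fmax (fun i => PySem.Int.bxor x (A.getD i 0)) ans
          ((stkIdx A m).takeWhile p ++ D.take 1) := by
    intro D hD
    cases D with
    | nil =>
      unfold stepA
      rw [popLoop_eq, hmap_tw, hmap_dw, hD, List.map_nil, List.take_nil, List.append_nil]
      exact hfold _ ans
    | cons h tl =>
      unfold stepA
      rw [popLoop_eq, hmap_tw, hmap_dw, hD, List.map_cons]
      show max (fmax (fun v => PySem.Int.bxor x v) ans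
          (((stkIdx A m).takeWhile p).map (fun i => A.getD i 0))) (PySem.Int.bxor x (A.getD h 0))
        = fmax (fun i => PySem.Int.bxor x (A.getD i 0)) ans ((stkIdx A m).takeWhile p ++ [h])
      rw [fmax_append_singleton, hfold]
  -- the stack produced by the step
  have hstack : (stepA ((stkIdx A m).map (fun i => A.getD i 0), ans) x).1 =
      (stkIdx A (m + 1)).map (fun i => A.getD i 0) := by
    have hdw := hmap_dw
    have hpw := stkIdx_pw_pred A m x
    have hdrop : (stkIdx A m).dropWhile p = (stkIdx A m).filter (fun a => ! p a) :=
      dropWhile_eq_filter_of_pw hpw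
    have hfc : (stkIdx A m).filter (fun a => ! p a)
        = (stkIdx A m).filter (fun i => decide (x ≤ A.getD i 0)) := by
      apply List.filter_congr
      intro i _
      rw [hp, Bool.eq_iff_iff]
      simp only [decide_eq_true_eq, Bool.not_eq_true', decide_eq_false_iff_not]
      exact not_lt
    have hres : (stkIdx A (m + 1)).map (fun i => A.getD i 0)
        = x :: ((stkIdx A m).dropWhile p).map (fun i => A.getD i 0) := by
      rw [stkIdx_succ, List.map_cons, hdrop, hfc, hx]
    cases hD : (stkIdx A m).dropWhile p with
    | nil =>
      unfold stepA
      rw [popLoop_eq, hmap_dw, hD, List.map_nil]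
      show (x :: ([] : List Int)) = (stkIdx A (m + 1)).map (fun i => A.getD i 0)
      rw [hres, hD, List.map_nil]
    | cons h tl =>
      unfold stepA
      rw [popLoop_eq, hmap_dw, hD, List.map_cons]
      show (x :: A.getD h 0 :: tl.map (fun i => A.getD i 0))
          = (stkIdx A (m + 1)).map (fun i => A.getD i 0)
      rw [hres, hD, List.map_cons]
  -- combine, rewriting B's inner loop through the membership bijection
  have hmemeq : ∀ val : Int,
      (∃ v ∈ (stkIdx A m).takeWhile p ++ ((stkIdx A m).dropWhile p).take 1,
          PySem.Int.bxor x (A.getD v 0) = val)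
        ↔ (∃ w ∈ (List.range m).filter (fun i => pairOKb A i m),
          PySem.Int.bxor (A.getD w 0) (A.getD m 0) = val) := by
    intro val
    constructor
    · rintro ⟨v, hv, rfl⟩
      rcases (contrib_iff A m v).mp hv with ⟨hvm, hpok⟩
      refine ⟨v, ?_, ?_⟩
      · rw [List.mem_filter, List.mem_range]
        exact ⟨hvm, (pairOKb_iff A m v).mpr hpok⟩
      · rw [hx, PySem.Int.bxor_comm]
    · rintro ⟨w, hw, rfl⟩
      rw [List.mem_filter, List.mem_range] at hw
      refine ⟨w, (contrib_iff A m w).mpr ⟨hw.1, (pairOKb_iff A m w).mp hw.2⟩, ?_⟩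
      rw [hx, PySem.Int.bxor_comm]
  have hans' := hans _ rfl
  have : (stepA ((stkIdx A m).map (fun i => A.getD i 0), ans) x).2 = innerB A ans m := by
    rw [hans', innerB_eq]
    exact fmax_ext _ _ hmemeq ans
  exact Prod.ext hstack this

-- B's outer loop accumulated up to j < m
def bAcc (A : List Int) (m : Nat) : Int := (List.range m).foldl (innerB A) 0

lemma bAcc_succ (A : List Int) (m : Nat) : bAcc A (m + 1) = innerB A (bAcc A m) m := by
  unfold bAcc
  rw [List.range_succ, List.foldl_append]
  rfl

-- the main fold invariant
lemma fold_inv (A : List Int) :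
    ∀ d m, m + d = A.length →
      (A.drop m).foldl stepA ((stkIdx A m).map (fun i => A.getD i 0), bAcc A m)
        = ((stkIdx A A.length).map (fun i => A.getD i 0), bAcc A A.length) := by
  intro d
  induction d with
  | zero =>
    intro m hm
    have : m = A.length := by omega
    subst this
    rw [List.drop_length]
    rfl
  | succ d ih =>
    intro m hm
    have hmlt : m < A.length := by omega
    rw [List.drop_eq_getElem_cons hmlt, List.foldl_cons]
    have hget : A[m] = A.getD m 0 := (List.getD_eq_getElem A 0 hmlt).symm
    rw [hget, step_eq, ← bAcc_succ]
    exact ih (m + 1) (by omega)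

lemma stkIdx_one (A : List Int) : stkIdx A 1 = [0] := by
  have h0 : sMaxb A 1 0 = true := by
    rw [sMaxb_iff]
    intro k hk hk'; omega
  unfold stkIdx
  rw [List.range_succ, List.range_zero, List.nil_append]
  simp [List.filter_cons, h0]

-- ===== VERDICT (by name: the statement is the Claim_ definition above) =====
theorem solve_spec : Claim_equal_solve := by
  intro A hdom hpre
  unfold Spec_solve
  match hA : A with
  | [] => exact absurd rfl hpre
  | a0 :: rest =>
    show (rest.foldl stepA ([a0], 0)).2 = solve_alt (a0 :: rest)
    have hstk1 : (stkIdx (a0 :: rest) 1).map (fun i => (a0 :: rest).getD i 0) = [a0] := by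
      rw [stkIdx_one]; rfl
    have hacc1 : bAcc (a0 :: rest) 1 = 0 := by
      simp [bAcc, innerB, List.range_succ]
    have hmain := fold_inv (a0 :: rest) rest.length 1 (by rw [List.length_cons]; omega)
    rw [hstk1, hacc1] at hmain
    have hdrop1 : (a0 :: rest).drop 1 = rest := rfl
    rw [hdrop1] at hmain
    rw [hmain]
    rfl
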